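-- pv_equiv track=rewrite | github.com/a95128/EngWeb2024 | TPC3/tonewjson.py | calc_actors_ids
-- ===== SOURCE A (Python) =====
-- def calc_actors_ids(filmes):
--     atores_ids = {}
--     contador = 1
--     for filme in filmes:
--         for ator in filme["cast"]:
--             if ator not in atores_ids:
--                 atores_ids[ator] = f"a{contador}"
--                 contador += 1
--     return atores_ids
-- ===== SOURCE B (Python) =====
-- def calc_actors_ids(filmes):
--     stream = [ator for filme in filmes for ator in filme["cast"]]
--     return {ator: f"a{len(set(stream[:stream.index(ator)])) + 1}" for ator in stream}
-- ===== Notes on version B (the rewrite author's own statement) =====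
-- stated objective: alternative
-- what changed: Instead of a sequential scan maintaining a seen-dict and a counter, B computes each actor's id independently by a closed-form rule: flatten the casts into one stream, then for every actor its id is 1 + the number of distinct actors in the stream strictly before the actor's first occurrence (len(set(stream[:stream.index(ator)])) + 1), built in a single dict comprehension with no accumulator state.
import Mathlib
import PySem

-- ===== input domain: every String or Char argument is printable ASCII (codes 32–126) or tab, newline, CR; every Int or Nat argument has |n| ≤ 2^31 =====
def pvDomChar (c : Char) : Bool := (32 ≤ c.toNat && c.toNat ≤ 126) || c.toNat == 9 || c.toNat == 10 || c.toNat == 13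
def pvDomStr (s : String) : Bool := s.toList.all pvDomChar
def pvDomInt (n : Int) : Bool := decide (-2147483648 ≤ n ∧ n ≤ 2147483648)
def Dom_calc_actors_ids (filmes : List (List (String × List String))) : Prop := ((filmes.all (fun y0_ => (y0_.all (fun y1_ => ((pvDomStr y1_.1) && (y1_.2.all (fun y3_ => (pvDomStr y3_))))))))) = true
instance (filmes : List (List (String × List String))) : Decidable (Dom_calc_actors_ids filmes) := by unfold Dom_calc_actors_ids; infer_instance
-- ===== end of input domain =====

-- B assigns each actor's id by a closed-form per-actor rule (1 + distinct actors before its first occurrence in the flattened cast stream) instead of A's sequential seen-dict + counter scan.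


-- ===== PORT A =====
-- atores_ids = {}; contador = 1; nested for-loops; add ator with f"a{contador}" when unseen.
def calc_actors_ids (filmes : List (List (String × List String))) : List (String × String) :=
  (filmes.foldl
    (fun (st : PySem.Dict String String × Int) filme =>
      (((PySem.Dict.mk filme).get? "cast").getD []).foldl
        (fun (st : PySem.Dict String String × Int) ator =>
          if (st.1.contains ator) = false then
            (st.1.insert ator ("a" ++ PySem.Int.toStr st.2), st.2 + 1)
          else st)
        st)
    (PySem.Dict.empty, 1)).1.items

-- ===== PORT B =====
-- stream = [ator for filme in filmes for ator in filme["cast"]]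
-- {ator: f"a{len(set(stream[:stream.index(ator)])) + 1}" for ator in stream}
def calc_actors_ids_alt (filmes : List (List (String × List String))) : List (String × String) :=
  let stream := filmes.flatMap (fun filme => ((PySem.Dict.mk filme).get? "cast").getD [])
  (stream.foldl
    (fun (d : PySem.Dict String String) ator =>
      d.insert ator ("a" ++ PySem.Int.toStr
        (((PySem.Set.ofList (PySem.List.slice stream none
            (some (((PySem.List.index? stream ator).getD 0 : Nat) : Int)))).length : Int) + 1)))
    PySem.Dict.empty).items

-- ===== PRECONDITION & SPEC =====
-- Pre_ excludes filmes lacking the "cast" key, on which A raises KeyError.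
def Pre_calc_actors_ids (filmes : List (List (String × List String))) : Prop :=
  ∀ filme ∈ filmes, ((PySem.Dict.mk filme).contains "cast") = true
instance (filmes : List (List (String × List String))) : Decidable (Pre_calc_actors_ids filmes) := by unfold Pre_calc_actors_ids; infer_instance
def pvWitness_calc_actors_ids : (List (List (String × List String))) :=
  [[("cast", ["Ana", "Bob"])], [("cast", ["Bob", "Eva"]), ("year", [])]]
def Spec_calc_actors_ids (filmes : List (List (String × List String))) (out : List (String × String)) : Prop := out = calc_actors_ids_alt filmes
instance (filmes : List (List (String × List String))) (out : List (String × String)) : Decidable (Spec_calc_actors_ids filmes out) := by unfold Spec_calc_actors_ids; infer_instance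

-- ===== CLAIM (what is proved, stated in full; the proofs are below) =====
def Claim_equal_calc_actors_ids : Prop := ∀ (filmes : List (List (String × List String))), Dom_calc_actors_ids filmes → Pre_calc_actors_ids filmes → Spec_calc_actors_ids filmes (calc_actors_ids filmes)

-- ===== LEMMAS AND PROOFS =====

-- the flattened cast stream
def streamOf (filmes : List (List (String × List String))) : List String :=
  filmes.flatMap (fun filme => ((PySem.Dict.mk filme).get? "cast").getD [])

-- B's per-actor label, as a function of the stream and the actor
def labB (stream : List String) (a : String) : String :=
  "a" ++ PySem.Int.toStr
    (((PySem.Set.ofList (PySem.List.slice stream none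
        (some (((PySem.List.index? stream a).getD 0 : Nat) : Int)))).length : Int) + 1)

-- the labelled dict built from a list of distinct actor names (A's result shape)
def mkDict (ks : List String) : PySem.Dict String String :=
  PySem.Dict.mk ((PySem.List.enumerate ks 1).map (fun p => (p.2, "a" ++ PySem.Int.toStr p.1)))

-- A's inner loop body
def stepA (st : PySem.Dict String String × Int) (ator : String) : PySem.Dict String String × Int :=
  if (st.1.contains ator) = false then
    (st.1.insert ator ("a" ++ PySem.Int.toStr st.2), st.2 + 1)
  else st

lemma keys_mkDict (ks : List String) : (mkDict ks).keys = ks := by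
  simp [mkDict, PySem.Dict.keys_mk, List.map_map, Function.comp_def,
    PySem.List.map_snd_enumerate]

lemma mkDict_append (ks : List String) (x : String) :
    mkDict (ks ++ [x]) =
      PySem.Dict.mk ((mkDict ks).items ++ [(x, "a" ++ PySem.Int.toStr ((ks.length : Int) + 1))]) := by
  simp [mkDict, PySem.List.enumerate_append, add_comm]

lemma stepA_inv (xs : List String) (s : List String) (hs : s.Nodup) :
    xs.foldl stepA (mkDict s, (s.length : Int) + 1)
      = (mkDict (PySem.Set.update s xs), ((PySem.Set.update s xs).length : Int) + 1) := by
  induction xs generalizing s with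
  | nil => simp [PySem.Set.update]
  | cons x xs ih =>
    rw [List.foldl_cons, PySem.Set.update_cons]
    by_cases hx : x ∈ s
    · have hc : (mkDict s).contains x = true := by
        rw [PySem.Dict.contains_iff_mem_keys, keys_mkDict]; exact hx
      rw [show stepA (mkDict s, (s.length : Int) + 1) x = (mkDict s, (s.length : Int) + 1) by
        simp [stepA, hc]]
      rw [PySem.Set.add_of_mem hx]
      exact ih s hs
    · have hc : (mkDict s).contains x = false := by
        rw [← Bool.not_eq_true, PySem.Dict.contains_iff_mem_keys, keys_mkDict]; exact hx
      have hins : (mkDict s).insert x ("a" ++ PySem.Int.toStr ((s.length : Int) + 1))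
          = mkDict (s ++ [x]) := by
        apply PySem.Dict.ext
        rw [PySem.Dict.items_insert_of_not_contains _ _ hc, mkDict_append]
      rw [show stepA (mkDict s, (s.length : Int) + 1) x
            = (mkDict (s ++ [x]), ((s ++ [x]).length : Int) + 1) by
        simp only [stepA, hc]
        simp [hins]]
      rw [PySem.Set.add_of_not_mem hx]
      exact ih (s ++ [x]) (by simp [List.nodup_append, hs]; intro a ha h; exact hx (h ▸ ha))

-- the nested loop over filmes is the loop over the flattened cast stream
lemma foldl_nested (filmes : List (List (String × List String)))
    (st : PySem.Dict String String × Int) :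
    filmes.foldl (fun st filme => (((PySem.Dict.mk filme).get? "cast").getD []).foldl stepA st) st
      = (streamOf filmes).foldl stepA st := by
  induction filmes generalizing st with
  | nil => rfl
  | cons f fs ih => simp [streamOf, List.foldl_append, ih]

-- a fold of inserts whose value depends only on the key: last lookup wins, value by key
lemma getD_foldl_insert_fun (f : String → String) (l : List String)
    (d : PySem.Dict String String) (a dflt : String) :
    (l.foldl (fun d x => d.insert x (f x)) d).getD a dflt
      = if a ∈ l then f a else d.getD a dflt := by
  induction l generalizing d with
  | nil => simp
  | cons x l ih =>
    rw [List.foldl_cons, ih]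
    by_cases hl : a ∈ l
    · simp [hl]
    · by_cases hax : a = x
      · simp [hax]
      · simp [hl, hax, PySem.Dict.getD_insert, List.mem_cons]

-- B's label at the j-th distinct actor is "a(j+1)"
lemma labB_at (stream : List String) (j : Nat) (hj : j < (PySem.List.dedup stream).length) :
    labB stream ((PySem.List.dedup stream)[j]) = "a" ++ PySem.Int.toStr ((j : Int) + 1) := by
  have hmem : (PySem.List.dedup stream)[j] ∈ stream := by
    have h0 : (PySem.List.dedup stream)[j] ∈ PySem.List.dedup stream := List.getElem_mem hj
    rwa [PySem.List.mem_dedup] at h0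
  generalize hga : (PySem.List.dedup stream)[j] = a at hmem ⊢
  obtain ⟨i, hi⟩ : ∃ i, PySem.List.index? stream a = some i := by
    have := (PySem.List.index?_isSome_iff stream a).mpr hmem
    exact Option.isSome_iff_exists.mp this
  obtain ⟨pre, suf, hdec, hlen, hnp⟩ := (PySem.List.index?_eq_some_iff stream a i).mp hi
  have htake : PySem.List.slice stream none (some ((i : Nat) : Int)) = pre := by
    rw [PySem.List.slice_to_natCast, hdec, ← hlen, List.take_left]
  have hnpo : a ∉ PySem.Set.ofList pre := by
    rw [PySem.Set.mem_ofList]; exact hnp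
  have hidx : PySem.List.index? (PySem.List.dedup stream) a
      = some (PySem.Set.ofList pre).length := by
    conv_lhs => rw [PySem.List.dedup_eq_ofList, hdec]
    rw [PySem.Set.ofList_append, PySem.Set.update_cons, PySem.Set.add_of_not_mem hnpo,
      PySem.Set.update_eq_append_filter,
      PySem.List.index?_append_of_mem _ (by simp),
      PySem.List.index?_append_singleton_self _ a hnpo]
  have hnd : (PySem.List.dedup stream).Nodup := PySem.List.nodup_dedup stream
  obtain ⟨hk, hget, hmin⟩ := PySem.List.getElem_of_index?_eq_some hidx
  have hj' : (PySem.Set.ofList pre).length = j := by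
    have hEq : (PySem.List.dedup stream)[(PySem.Set.ofList pre).length]'hk
        = (PySem.List.dedup stream)[j]'hj := by rw [hget, hga]
    exact (List.Nodup.getElem_inj_iff hnd).mp hEq
  simp only [labB, hi, Option.getD_some, htake, hj']

-- ===== VERDICT (by name: the statement is the Claim_ definition above) =====
theorem calc_actors_ids_spec : Claim_equal_calc_actors_ids := by
  intro filmes _ _
  unfold Spec_calc_actors_ids
  have hA : calc_actors_ids filmes = (mkDict (PySem.List.dedup (streamOf filmes))).items := by
    unfold calc_actors_ids
    rw [show (fun (st : PySem.Dict String String × Int) ator =>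
          if (st.1.contains ator) = false then
            (st.1.insert ator ("a" ++ PySem.Int.toStr st.2), st.2 + 1)
          else st) = stepA from rfl]
    rw [foldl_nested,
      show ((PySem.Dict.empty : PySem.Dict String String), (1 : Int))
          = (mkDict [], ((List.length ([] : List String) : Int) + 1)) from rfl,
      stepA_inv _ [] List.nodup_nil]
    rw [PySem.Set.update_nil_left, ← PySem.List.dedup_eq_ofList]
  have hB : calc_actors_ids_alt filmes
      = ((streamOf filmes).foldl
          (fun (d : PySem.Dict String String) ator => d.insert ator (labB (streamOf filmes) ator))
          PySem.Dict.empty).items := rfl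
  rw [hA, hB]
  set stream := streamOf filmes with hst
  set DB := stream.foldl
      (fun (d : PySem.Dict String String) ator => d.insert ator (labB stream ator))
      PySem.Dict.empty with hDB
  have hkeys : DB.keys = PySem.List.dedup stream := by
    rw [hDB, PySem.Dict.keys_foldl_insert, PySem.Dict.keys_empty,
      PySem.Set.update_nil_left, PySem.List.dedup_eq_ofList]
  have hndk : DB.keys.Nodup := by
    rw [hkeys]; exact PySem.List.nodup_dedup stream
  rw [PySem.Dict.items_eq_map_keys DB hndk "", hkeys]
  apply List.ext_getElem
  · simp [mkDict, PySem.List.length_enumerate]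
  · intro j h1 h2
    have hju : j < (PySem.List.dedup stream).length := by simpa using h2
    have hjm : (PySem.List.dedup stream)[j] ∈ stream := by
      have h0 : (PySem.List.dedup stream)[j] ∈ PySem.List.dedup stream := List.getElem_mem hju
      rwa [PySem.List.mem_dedup] at h0
    have hgetD : DB.getD (PySem.List.dedup stream)[j] ""
        = labB stream (PySem.List.dedup stream)[j] := by
      rw [hDB, getD_foldl_insert_fun, if_pos hjm]
    simp only [mkDict, List.getElem_map,
      PySem.List.getElem_enumerate, hgetD, labB_at stream j hju]
    simp [add_comm]
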